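-- pv_equiv track=rewrite | github.com/shirakawanoseki/100 | ch1/03.py | count_alphabets
-- ===== SOURCE A (Python) =====
-- def count_alphabets(str):
--     """ 引数に指定された文字列に含まれる単語のアルファベット数を文字列中の出現順にリスト
--     Args:
--       str: 任意の英文の文字列
--     Raise:
--       特になし
--     Return:
--       単語に含まれるアルファベット数のリスト
--     Note:
--     """
--     splited_str = str.split(' ')
--     result_list = []
--     for word in splited_str:
--         alphabets = list(word)
--         alphabets_count = 0
--         for alphabet in alphabets:
--             #アルファベットの場合にのみカウント
--             if alphabet.isalpha():
--                 alphabets_count += 1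
--         result_list.append(alphabets_count)
--     return result_list
-- ===== SOURCE B (Python) =====
-- def count_alphabets(str):
--     """Single left-to-right scan; no split, no per-word inner loop."""
--     result = []
--     count = 0
--     for ch in str:
--         if ch == ' ':
--             result.append(count)
--             count = 0
--         elif ch.isalpha():
--             count += 1
--     result.append(count)
--     return result
-- ===== Notes on version B (the rewrite author's own statement) =====
-- stated objective: alternative
-- what changed: Replaced the split-on-space plus nested per-word counting loop by a single character scan that keeps a running counter, emitting it at each space separator and once at the end.
import Mathlib
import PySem

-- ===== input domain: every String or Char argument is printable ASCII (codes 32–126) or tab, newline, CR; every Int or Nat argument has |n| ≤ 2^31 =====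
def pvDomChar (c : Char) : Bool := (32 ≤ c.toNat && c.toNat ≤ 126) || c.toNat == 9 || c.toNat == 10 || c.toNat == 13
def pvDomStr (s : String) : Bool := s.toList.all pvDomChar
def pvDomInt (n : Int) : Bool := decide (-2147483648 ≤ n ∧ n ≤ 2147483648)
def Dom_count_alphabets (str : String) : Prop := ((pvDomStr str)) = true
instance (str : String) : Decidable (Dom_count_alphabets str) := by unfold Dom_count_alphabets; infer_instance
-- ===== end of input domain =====

-- B replaces split(' ') + nested per-word counting by one character scan (alternative decomposition, same cost).


-- ===== PORT A =====
def count_alphabets (str : String) : List Int :=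
  let splited_str := (PySem.Str.split? str " ").getD []   -- sep " " is nonempty, so split? is `some`
  splited_str.foldl (fun result_list word =>
    result_list ++
      [word.toList.foldl (fun alphabets_count alphabet =>
        if PySem.Chars.isalpha alphabet then alphabets_count + 1 else alphabets_count) (0 : Int)]) []

-- ===== PORT B =====
def count_alphabets_alt (str : String) : List Int :=
  let p := str.toList.foldl (fun (st : List Int × Int) ch =>
      if ch = ' ' then (st.1 ++ [st.2], 0)
      else if PySem.Chars.isalpha ch then (st.1, st.2 + 1) else st) ([], 0)
  p.1 ++ [p.2]

-- ===== PRECONDITION & SPEC =====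
def Spec_count_alphabets (str : String) (out : List Int) : Prop := out = count_alphabets_alt str
instance (str : String) (out : List Int) : Decidable (Spec_count_alphabets str out) := by unfold Spec_count_alphabets; infer_instance

-- ===== CLAIM (what is proved, stated in full; the proofs are below) =====
def Claim_equal_count_alphabets : Prop := ∀ (str : String), Dom_count_alphabets str → Spec_count_alphabets str (count_alphabets str)

-- ===== LEMMAS AND PROOFS =====

/-- Reference splitter on single space, structural on the char list. -/
def pvSplit : List Char → List (List Char)
  | [] => [[]]
  | c :: rest => if c = ' ' then [] :: pvSplit rest else (pvSplit rest).modifyHead (c :: ·)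

lemma pvSplit_ne_nil (l : List Char) : pvSplit l ≠ [] := by
  cases l with
  | nil => simp [pvSplit]
  | cons c rest =>
    simp only [pvSplit]
    split_ifs <;> simp [List.modifyHead_eq_nil_iff, pvSplit_ne_nil rest]

lemma go_space (fuel : Nat) : ∀ (l cur : List Char) (acc : List (List Char)),
    l.length < fuel →
    PySem.Chars.splitOn.go [' '] fuel l cur acc
      = acc.reverse ++ (pvSplit l).modifyHead (cur.reverse ++ ·) := by
  induction fuel with
  | zero => intro l cur acc h; omega
  | succ n ih =>
    intro l cur acc h
    cases l with
    | nil => simp [PySem.Chars.splitOn.go, pvSplit]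
    | cons c rest =>
      by_cases hc : c = ' '
      · subst hc
        rw [show PySem.Chars.splitOn.go [' '] (n+1) (' ' :: rest) cur acc
              = PySem.Chars.splitOn.go [' '] n rest [] (cur.reverse :: acc) from by
            simp [PySem.Chars.splitOn.go, List.isPrefixOf]]
        rw [ih rest [] (cur.reverse :: acc) (by simpa using Nat.lt_of_succ_lt_succ h)]
        simp [pvSplit]
        cases pvSplit rest <;> simp [List.modifyHead]
      · rw [show PySem.Chars.splitOn.go [' '] (n+1) (c :: rest) cur acc
              = PySem.Chars.splitOn.go [' '] n rest (c :: cur) acc from by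
            have hp : [' '].isPrefixOf (c :: rest) = false := by
              simp [List.isPrefixOf, beq_iff_eq, Ne.symm hc]
            simp [PySem.Chars.splitOn.go, hp]]
        rw [ih rest (c :: cur) acc (by simpa using Nat.lt_of_succ_lt_succ h)]
        simp only [pvSplit, if_neg hc, List.reverse_cons]
        congr 1
        obtain ⟨x, xs, hx⟩ := List.exists_cons_of_ne_nil (pvSplit_ne_nil rest)
        simp [hx, List.modifyHead]

lemma splitOn_space (l : List Char) :
    PySem.Chars.splitOn l [' '] = pvSplit l := by
  unfold PySem.Chars.splitOn
  rw [go_space (l.length + 1) l [] [] (by omega)]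
  simp
  obtain ⟨x, xs, hx⟩ := List.exists_cons_of_ne_nil (pvSplit_ne_nil l)
  simp [hx, List.modifyHead]

/-- A's per-word inner loop counts alphabetic characters. -/
lemma inner_count (w : List Char) : ∀ (n : Int),
    w.foldl (fun c a => if PySem.Chars.isalpha a then c + 1 else c) n
      = n + (w.countP (fun a => PySem.Chars.isalpha a) : Int) := by
  induction w with
  | nil => intro n; simp
  | cons c rest ih =>
    intro n
    by_cases h : PySem.Chars.isalpha c <;> simp [List.countP_cons, h, ih] <;> ring

/-- A's outer loop is a map over the split. -/
lemma foldl_append_map {α β : Type} (f : α → β) (l : List α) : ∀ (init : List β),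
    l.foldl (fun acc w => acc ++ [f w]) init = init ++ l.map f := by
  induction l with
  | nil => intro init; simp
  | cons x xs ih => intro init; simp [ih]

def pvCnt (w : List Char) : Int := (w.countP (fun a => PySem.Chars.isalpha a) : Int)

/-- B's step function (definitionally the lambda in count_alphabets_alt). -/
def pvStep : List Int × Int → Char → List Int × Int := fun st ch =>
  if ch = ' ' then (st.1 ++ [st.2], 0)
  else if PySem.Chars.isalpha ch then (st.1, st.2 + 1) else st

lemma modifyHead_zero_add (xs : List Int) :
    xs.modifyHead ((0 : Int) + ·) = xs := by
  cases xs <;> simp [List.modifyHead]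

/-- B's scan, characterized against pvSplit. -/
lemma b_scan (l : List Char) : ∀ (res : List Int) (count : Int),
    (l.foldl pvStep (res, count)).1 ++ [(l.foldl pvStep (res, count)).2]
      = res ++ ((pvSplit l).map pvCnt).modifyHead (count + ·) := by
  induction l with
  | nil => intro res count; simp [pvSplit, pvCnt, List.modifyHead]
  | cons c rest ih =>
    intro res count
    rw [List.foldl_cons]
    by_cases hc : c = ' '
    · subst hc
      rw [show pvStep (res, count) ' ' = (res ++ [count], 0) from by simp [pvStep]]
      rw [ih (res ++ [count]) 0]
      simp [pvSplit, pvCnt, List.modifyHead]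
      cases List.map pvCnt (pvSplit rest) <;> rfl
    · have hne := pvSplit_ne_nil rest
      obtain ⟨x, xs, hx⟩ := List.exists_cons_of_ne_nil hne
      by_cases ha : PySem.Chars.isalpha c
      · rw [show pvStep (res, count) c = (res, count + 1) from by simp [pvStep, hc, ha]]
        rw [ih res (count + 1)]
        simp [pvSplit, if_neg hc, hx, List.modifyHead, pvCnt, List.countP_cons, ha]
        ring
      · rw [show pvStep (res, count) c = (res, count) from by simp [pvStep, hc, ha]]
        rw [ih res count]
        simp [pvSplit, if_neg hc, hx, List.modifyHead, pvCnt, List.countP_cons, ha]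

-- ===== VERDICT (by name: the statement is the Claim_ definition above) =====
theorem count_alphabets_spec : Claim_equal_count_alphabets := by
  intro str _
  have hsplit : (PySem.Str.split? str " ").getD []
      = (pvSplit str.toList).map String.ofList := by
    simp [PySem.Str.split?, PySem.Chars.split?]
    rw [splitOn_space]
  have hB : count_alphabets_alt str
      = ((pvSplit str.toList).map pvCnt).modifyHead ((0 : Int) + ·) :=
    b_scan str.toList [] 0
  unfold Spec_count_alphabets
  rw [hB, modifyHead_zero_add]
  show ((PySem.Str.split? str " ").getD []).foldl
      (fun result_list word => result_list ++ [word.toList.foldl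
        (fun c a => if PySem.Chars.isalpha a then c + 1 else c) (0 : Int)]) []
      = (pvSplit str.toList).map pvCnt
  rw [hsplit, foldl_append_map, List.nil_append, List.map_map]
  apply List.map_congr_left
  intro w _
  simp [pvCnt, Function.comp, inner_count]
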